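-- pv_equiv track=rewrite | github.com/farazlfc/CP | Sum_of_digits_of_all_numbers.py | way_1
-- ===== SOURCE A (Python) =====
-- def get_digits(n):
--   answer = []
--   while n>0:
--     temp = n%10
--     answer.append(temp)
--     n = n//10
--   return answer[::-1]
--
-- def way_1(n):   #sum of digits of all numbers from 1 to n
--   digits = get_digits(n)
--   length = len(digits)
--   MAX = 9*(length + 1)
--   dp = [[[None for _ in range(2)] for _ in range(MAX)] for _ in range(length + 1)]
--   def recurse(index,SUM,bound):
--     if index == length:
--       return SUM
--     if dp[index][SUM][bound] is not None:
--       return dp[index][SUM][bound]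
--     curr = digits[index]
--     if bound:
--       end = curr
--     else:
--       end = 9
--     ans = 0
--     for digit in range(end + 1):
--       if bound and digit == end:
--         ans+= recurse(index + 1,SUM + digit,1)
--       else:
--         ans+= recurse(index + 1,SUM + digit,0)
--     dp[index][SUM][bound] = ans;
--     return ans
--
--
--
--   curr = digits[0]
--   ans = 0
--   for digit in range(0,curr + 1):
--     if digit == curr:
--       new_bound = 1
--       ans+= recurse(1,digit,new_bound)
--     else:
--       new_bound = 0
--       ans+= recurse(1,digit,new_bound)
--   return(ans);
-- ===== SOURCE B (Python) =====
-- def way_1(n):   #sum of digits of all numbers from 1 to n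
--   # Closed form per digit place: partition 0..n by the first (highest) digit
--   # position where a number differs from n; one arithmetic term per place.
--   total = 0
--   lower = 0   # value of the digit places already processed
--   p = 1       # 10**i
--   i = 0
--   m = n
--   while m > 0:
--     c = m % 10
--     total += c * (c - 1) // 2 * p      # sum of the smaller digit choices at this place
--     total += 45 * c * i * (p // 10)    # the i free lower places over those choices
--     total += c * (lower + 1)           # this digit of n itself, in numbers sharing it
--     lower += c * p
--     p *= 10
--     i += 1
--     m //= 10
--   return total
-- ===== Notes on version B (the rewrite author's own statement) =====
-- stated objective: faster
-- what changed: A runs a memoized digit-DP (recursion over digit positions with a 3-D table keyed by index/sum/bound); B is a single arithmetic while-loop over the digit places of n that adds one closed-form term per place (partitioning 0..n by the highest digit position where a number differs from n), with no recursion, no table and no digit list.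
import Mathlib
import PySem

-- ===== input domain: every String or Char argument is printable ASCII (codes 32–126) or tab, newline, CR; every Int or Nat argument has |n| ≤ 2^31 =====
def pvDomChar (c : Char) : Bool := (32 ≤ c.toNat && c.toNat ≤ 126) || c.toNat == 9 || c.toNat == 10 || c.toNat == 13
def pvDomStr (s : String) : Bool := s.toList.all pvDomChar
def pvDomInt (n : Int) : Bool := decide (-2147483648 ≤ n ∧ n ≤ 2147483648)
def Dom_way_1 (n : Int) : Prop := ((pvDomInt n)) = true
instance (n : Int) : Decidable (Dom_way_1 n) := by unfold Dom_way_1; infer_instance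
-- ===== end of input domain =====

-- B replaces A's memoized digit-DP by one closed-form arithmetic term per digit place (no recursion, no table).
-- A raises IndexError for n ≤ 0 (digits[0] on an empty list); those inputs are outside Pre_way_1.

-- ===== PORT A =====
-- get_digits: while n>0: answer.append(n%10); n //= 10; return answer[::-1]
def get_digits_aux (n : Int) (answer : List Int) : List Int :=
  if 0 < n then
    get_digits_aux (PySem.Int.floordiv n 10) (answer ++ [PySem.Int.mod n 10])
  else answer
termination_by n.toNat
decreasing_by
  rename_i h
  rw [PySem.Int.floordiv_eq_ediv_of_pos (by norm_num : (0:Int) < 10)]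
  omega

def get_digits (n : Int) : List Int :=
  (PySem.List.slice? (get_digits_aux n []) none none (-1)).getD []   -- answer[::-1]

-- recurse(index, SUM, bound); the 3-D dp table of Nones is ported as a dictionary
-- (absent key = None) keyed by (index, SUM, bound); fuel = length - index ≥ 0 holds
-- in every call (the fuel-0 branch is a totality guard only).
def way_1_rec (digits : List Int) (length : Int) :
    Nat → Int → Int → Int → PySem.Dict (Int × Int × Int) Int →
      Int × PySem.Dict (Int × Int × Int) Int
  | fuel, index, SUM, bound, memo =>
    if index == length then (SUM, memo)
    else
      match fuel with
      | 0 => (SUM, memo)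
      | fuel' + 1 =>
        match memo.get? (index, SUM, bound) with
        | some v => (v, memo)
        | none =>
          -- curr = digits[index]; 0 ≤ index < length always holds here, so the index is in range
          let curr := (PySem.List.pyGet? digits index).getD 0
          let e := if bound == 1 then curr else 9
          let st := (PySem.List.pyRange 0 (e + 1) 1).foldl
            (fun (st : Int × PySem.Dict (Int × Int × Int) Int) digit =>
              let r := if bound == 1 && digit == e
                then way_1_rec digits length fuel' (index + 1) (SUM + digit) 1 st.2
                else way_1_rec digits length fuel' (index + 1) (SUM + digit) 0 st.2
              (st.1 + r.1, r.2))
            (0, memo)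
          (st.1, st.2.insert (index, SUM, bound) st.1)

def way_1 (n : Int) : Int :=
  let digits := get_digits n
  let length : Int := digits.length
  -- curr = digits[0]: Python raises IndexError when the list is empty (n ≤ 0), excluded by Pre_way_1
  let curr := (PySem.List.pyGet? digits 0).getD 0
  let st := (PySem.List.pyRange 0 (curr + 1) 1).foldl
    (fun (st : Int × PySem.Dict (Int × Int × Int) Int) digit =>
      let r := if digit == curr
        then way_1_rec digits length (length - 1).toNat 1 digit 1 st.2
        else way_1_rec digits length (length - 1).toNat 1 digit 0 st.2
      (st.1 + r.1, r.2))
    (0, PySem.Dict.empty)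
  st.1

-- ===== PORT B =====
def way_1_alt_loop (m lower p i total : Int) : Int :=
  if 0 < m then
    let c := PySem.Int.mod m 10
    let total := total + PySem.Int.floordiv (c * (c - 1)) 2 * p
        + 45 * c * i * PySem.Int.floordiv p 10 + c * (lower + 1)
    way_1_alt_loop (PySem.Int.floordiv m 10) (lower + c * p) (p * 10) (i + 1) total
  else total
termination_by m.toNat
decreasing_by
  rename_i h
  rw [PySem.Int.floordiv_eq_ediv_of_pos (by norm_num : (0:Int) < 10)]
  omega

def way_1_alt (n : Int) : Int := way_1_alt_loop n 0 1 0 0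

-- ===== PRECONDITION & SPEC =====
-- Python A evaluates digits[0] of the empty digit list and raises IndexError for every n ≤ 0.
def Pre_way_1 (n : Int) : Prop := 1 ≤ n
instance (n : Int) : Decidable (Pre_way_1 n) := by unfold Pre_way_1; infer_instance
def pvWitness_way_1 : Int := 12

def Spec_way_1 (n : Int) (out : Int) : Prop := out = way_1_alt n
instance (n : Int) (out : Int) : Decidable (Spec_way_1 n out) := by unfold Spec_way_1; infer_instance

-- ===== CLAIM (what is proved, stated in full; the proofs are below) =====
def Claim_equal_way_1 : Prop := ∀ (n : Int), Dom_way_1 n → Pre_way_1 n → Spec_way_1 n (way_1 n)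

-- ===== LEMMAS AND PROOFS =====

-- 10^m, the digit-sum total W m = 45·m·10^(m-1) of all m-digit strings, triangular numbers
def tenp (m : Nat) : Int := 10 ^ m
def W : Nat → Int
  | 0 => 0
  | m + 1 => 45 * (m + 1) * tenp m
def tri (c : Int) : Int := PySem.Int.floordiv (c * (c - 1)) 2

-- value of an MSD-first digit list sitting above j lower places of value low
def valO : List Int → Int → Nat → Int
  | [], low, _ => low
  | c :: rest, low, j => c * tenp (rest.length + j) + valO rest low j

-- total digit-sum contribution of the numbers 0..val that first differ from val inside these places
def GmO : List Int → Int → Nat → Int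
  | [], _, _ => 0
  | c :: rest, low, j =>
      tri c * tenp (rest.length + j) + c * W (rest.length + j)
        + c * (valO rest low j + 1) + GmO rest low j

-- the pure (memo-free) value of recurse on the remaining digit suffix
def pvRec : List Int → Int → Int → Int
  | [], S, _ => S
  | c :: rest, S, b =>
      let e := if b == 1 then c else 9
      (PySem.List.pyRange 0 (e + 1) 1).foldl
        (fun a d => a + pvRec rest (S + d) (if b == 1 && d == e then 1 else 0)) 0

-- every entry of the memo dictionary stores the pure value of its key
def GoodMemo (digits : List Int) (memo : PySem.Dict (Int × Int × Int) Int) : Prop :=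
  ∀ i S b v, memo.get? (i, S, b) = some v → v = pvRec (digits.drop i.toNat) S b

lemma tenp_succ (l : Nat) : tenp (l + 1) = 10 * tenp l := by
  simp [tenp, pow_succ]; ring

lemma W_step (l : Nat) : W (l + 1) = 10 * W l + 45 * tenp l := by
  cases l with
  | zero => simp [W, tenp]
  | succ k => simp [W, tenp_succ]; ring

lemma tri_step (c : Int) : tri (c + 1) = tri c + c := by
  unfold tri
  obtain ⟨t, ht⟩ := Int.even_mul_succ_self (c - 1)
  have h1 : (c + 1) * (c + 1 - 1) = (c - 1) * (c - 1 + 1) + c + c := by ring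
  have h2 : c * (c - 1) = (c - 1) * (c - 1 + 1) := by ring
  rw [PySem.Int.floordiv_eq_ediv_of_pos (by norm_num : (0:Int) < 2),
      PySem.Int.floordiv_eq_ediv_of_pos (by norm_num : (0:Int) < 2), h1, h2, ht]
  omega

lemma sum_pyRange (c : Int) (h : 0 ≤ c) : (PySem.List.pyRange 0 c 1).sum = tri c := by
  induction c, h using Int.le_induction with
  | base => decide
  | succ c hc ih =>
    rw [PySem.List.pyRange_one_succ_right hc, List.sum_append, tri_step, ih]
    simp

lemma sum_affine (l : List Int) (A B : Int) :
    (l.map (fun d => d * A + B)).sum = l.sum * A + l.length * B := by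
  induction l with
  | nil => simp
  | cons x l ih => simp [ih]; ring

lemma pvRec_unbound (rest : List Int) : ∀ S : Int,
    pvRec rest S 0 = S * tenp rest.length + W rest.length := by
  induction rest with
  | nil => intro S; simp [pvRec, tenp, W]
  | cons c rest ih =>
    intro S
    rw [pvRec]
    simp only [show ((0:Int) == 1) = false from rfl, Bool.false_and, Bool.false_eq_true,
      if_false]
    rw [show PySem.List.pyRange 0 (9 + 1) 1 = [0, 1, 2, 3, 4, 5, 6, 7, 8, 9] from by decide]
    simp only [List.foldl, ih]
    simp only [List.length_cons, tenp_succ, W_step]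
    ring

lemma pvRec_bound (ds : List Int) : ∀ S : Int, (∀ c ∈ ds, 0 ≤ c) →
    pvRec ds S 1 = S * (valO ds 0 0 + 1) + GmO ds 0 0 := by
  induction ds with
  | nil => intro S h; simp [pvRec, valO, GmO]
  | cons c rest ih =>
    intro S h
    have hc : 0 ≤ c := h c (by simp)
    simp only [pvRec, show ((1:Int) == 1) = true from rfl, if_true, Bool.true_and]
    rw [PySem.List.pyRange_one_succ_right hc, List.foldl_append]
    simp only [List.foldl, beq_self_eq_true, if_true]
    rw [PySem.List.foldl_add]
    have hmap : (PySem.List.pyRange 0 c 1).map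
          (fun d => pvRec rest (S + d) (if d == c then 1 else 0))
        = (PySem.List.pyRange 0 c 1).map
          (fun d => d * tenp rest.length + (S * tenp rest.length + W rest.length)) := by
      apply List.map_congr_left
      intro d hd
      rw [PySem.List.mem_pyRange_one] at hd
      have hne : (d == c) = false := by simp; omega
      rw [hne]
      simp only [Bool.false_eq_true, if_false]
      rw [pvRec_unbound]
      ring
    rw [hmap, sum_affine, sum_pyRange c hc, PySem.List.length_pyRange_one,
      ih (S + c) (fun x hx => h x (by simp [hx]))]
    simp only [valO, GmO, Nat.add_zero]
    have hcast : ((c - 0).toNat : Int) = c := by omega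
    rw [hcast]
    ring

lemma inner_fold (digits : List Int) (fuel : Nat) (index SUM bound e : Int)
    (IH : ∀ (S b : Int) (memo : PySem.Dict (Int × Int × Int) Int), GoodMemo digits memo →
      (way_1_rec digits (digits.length : Int) fuel (index + 1) S b memo).1
          = pvRec (digits.drop (index.toNat + 1)) S b
        ∧ GoodMemo digits (way_1_rec digits (digits.length : Int) fuel (index + 1) S b memo).2) :
    ∀ (ds : List Int) (a : Int) (memo : PySem.Dict (Int × Int × Int) Int),
      GoodMemo digits memo →
      (ds.foldl (fun (st : Int × PySem.Dict (Int × Int × Int) Int) digit =>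
          let r := if bound == 1 && digit == e
            then way_1_rec digits (digits.length : Int) fuel (index + 1) (SUM + digit) 1 st.2
            else way_1_rec digits (digits.length : Int) fuel (index + 1) (SUM + digit) 0 st.2
          (st.1 + r.1, r.2)) (a, memo)).1
        = ds.foldl (fun acc d => acc + pvRec (digits.drop (index.toNat + 1)) (SUM + d)
            (if bound == 1 && d == e then 1 else 0)) a
      ∧ GoodMemo digits
          ((ds.foldl (fun (st : Int × PySem.Dict (Int × Int × Int) Int) digit =>
            let r := if bound == 1 && digit == e
              then way_1_rec digits (digits.length : Int) fuel (index + 1) (SUM + digit) 1 st.2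
              else way_1_rec digits (digits.length : Int) fuel (index + 1) (SUM + digit) 0 st.2
            (st.1 + r.1, r.2)) (a, memo)).2) := by
  intro ds
  induction ds with
  | nil => intro a memo hg; exact ⟨rfl, hg⟩
  | cons d ds ihds =>
    intro a memo hg
    simp only [List.foldl]
    cases hb : (bound == 1 && d == e) with
    | true =>
      simp only [reduceIte]
      obtain ⟨e1, e2⟩ := IH (SUM + d) 1 memo hg
      obtain ⟨f1, f2⟩ := ihds
        (a + (way_1_rec digits (digits.length : Int) fuel (index + 1) (SUM + d) 1 memo).1)
        (way_1_rec digits (digits.length : Int) fuel (index + 1) (SUM + d) 1 memo).2 e2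
      refine ⟨?_, f2⟩
      rw [f1, e1]
    | false =>
      simp only [Bool.false_eq_true, reduceIte]
      obtain ⟨e1, e2⟩ := IH (SUM + d) 0 memo hg
      obtain ⟨f1, f2⟩ := ihds
        (a + (way_1_rec digits (digits.length : Int) fuel (index + 1) (SUM + d) 0 memo).1)
        (way_1_rec digits (digits.length : Int) fuel (index + 1) (SUM + d) 0 memo).2 e2
      refine ⟨?_, f2⟩
      rw [f1, e1]

lemma recAux_correct (digits : List Int) :
    ∀ (fuel : Nat) (index SUM bound : Int)
      (memo : PySem.Dict (Int × Int × Int) Int),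
      0 ≤ index → index.toNat + fuel = digits.length → GoodMemo digits memo →
      (way_1_rec digits (digits.length : Int) fuel index SUM bound memo).1
          = pvRec (digits.drop index.toNat) SUM bound
        ∧ GoodMemo digits (way_1_rec digits (digits.length : Int) fuel index SUM bound memo).2 := by
  intro fuel
  induction fuel with
  | zero =>
    intro index SUM bound memo h0 hlen hg
    have hix : (index == (digits.length : Int)) = true := by simp; omega
    have hdrop : digits.drop index.toNat = [] := by
      rw [List.drop_eq_nil_iff]; omega
    rw [way_1_rec, if_pos hix, hdrop]
    exact ⟨rfl, hg⟩
  | succ fuel ih =>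
    intro index SUM bound memo h0 hlen hg
    have hlt : index.toNat < digits.length := by omega
    have hne : ¬ ((index == (digits.length : Int)) = true) := by simp; omega
    have hcurr : (PySem.List.pyGet? digits index).getD 0 = digits[index.toNat] := by
      rw [PySem.List.pyGet?_of_nonneg digits h0, List.getElem?_eq_getElem hlt]
      rfl
    have hdrop : digits.drop index.toNat
        = digits[index.toNat] :: digits.drop (index.toNat + 1) :=
      List.drop_eq_getElem_cons hlt
    have IH : ∀ (S b : Int) (memo : PySem.Dict (Int × Int × Int) Int), GoodMemo digits memo →
        (way_1_rec digits (digits.length : Int) fuel (index + 1) S b memo).1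
            = pvRec (digits.drop (index.toNat + 1)) S b
          ∧ GoodMemo digits (way_1_rec digits (digits.length : Int) fuel (index + 1) S b memo).2 := by
      intro S b memo' hg'
      have h1 : 0 ≤ index + 1 := by omega
      have h2 : (index + 1).toNat + fuel = digits.length := by omega
      have h3 : (index + 1).toNat = index.toNat + 1 := by omega
      rw [← h3]
      exact ih (index + 1) S b memo' h1 h2 hg'
    rw [way_1_rec, if_neg hne]
    cases hmem : memo.get? (index, SUM, bound) with
    | some v =>
      exact ⟨hg index SUM bound v hmem, hg⟩
    | none =>
      simp only [hcurr]
      obtain ⟨hfold, hgood⟩ := inner_fold digits fuel index SUM bound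
        (if bound == 1 then digits[index.toNat] else 9) IH
        (PySem.List.pyRange 0 ((if bound == 1 then digits[index.toNat] else 9) + 1) 1)
        0 memo hg
      constructor
      · rw [hfold, hdrop, pvRec]
      · intro i S b v hv
        rw [PySem.Dict.get?_insert] at hv
        by_cases hkey : (i, S, b) = (index, SUM, bound)
        · rw [if_pos hkey] at hv
          obtain ⟨hi, hS, hb2⟩ : i = index ∧ S = SUM ∧ b = bound := by
            simpa [Prod.ext_iff] using hkey
          subst hi; subst hS; subst hb2
          injection hv with hv'
          rw [← hv', hfold, hdrop, pvRec]
        · rw [if_neg hkey] at hv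
          exact hgood i S b v hv

-- LSD digit list of n
def lsd (n : Int) : List Int :=
  if 0 < n then PySem.Int.mod n 10 :: lsd (PySem.Int.floordiv n 10) else []
termination_by n.toNat
decreasing_by
  rename_i h
  rw [PySem.Int.floordiv_eq_ediv_of_pos (by norm_num : (0:Int) < 10)]
  omega

lemma get_digits_aux_eq (n : Int) (answer : List Int) :
    get_digits_aux n answer = answer ++ lsd n := by
  induction n, answer using get_digits_aux.induct with
  | case1 n answer h ih =>
    rw [get_digits_aux, if_pos h, ih]
    conv_rhs => rw [lsd, if_pos h]
    simp
  | case2 n answer h =>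
    rw [get_digits_aux, if_neg h, lsd, if_neg h]
    simp

lemma get_digits_eq (n : Int) : get_digits n = (lsd n).reverse := by
  rw [get_digits, get_digits_aux_eq, PySem.List.slice?_none_none_neg_one]
  simp

lemma get_digits_step (n : Int) (h : 0 < n) :
    get_digits n = get_digits (PySem.Int.floordiv n 10) ++ [PySem.Int.mod n 10] := by
  rw [get_digits_eq, get_digits_eq, lsd, if_pos h]
  simp

lemma lsd_nonneg (n : Int) : ∀ d ∈ lsd n, 0 ≤ d := by
  induction n using lsd.induct with
  | case1 n h ih =>
    rw [lsd, if_pos h]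
    intro d hd
    rcases List.mem_cons.mp hd with h1 | h2
    · subst h1
      rw [PySem.Int.mod_eq_emod_of_pos (by norm_num : (0:Int) < 10)]
      exact Int.emod_nonneg n (by norm_num)
    · exact ih d h2
  | case2 n h =>
    rw [lsd, if_neg h]
    intro d hd
    simp at hd

lemma get_digits_nonneg (n : Int) : ∀ d ∈ get_digits n, 0 ≤ d := by
  rw [get_digits_eq]
  intro d hd
  exact lsd_nonneg n d (List.mem_reverse.mp hd)

lemma valO_snoc (c low : Int) : ∀ (ds : List Int) (j : Nat),
    valO (ds ++ [c]) low j = valO ds (c * tenp j + low) (j + 1)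
  | [], j => by simp [valO]
  | c' :: ds, j => by
    have hl : (ds ++ [c]).length + j = ds.length + (j + 1) := by simp; omega
    simp only [List.cons_append, valO, hl, valO_snoc c low ds j]

lemma GmO_snoc (c low : Int) : ∀ (ds : List Int) (j : Nat),
    GmO (ds ++ [c]) low j
      = tri c * tenp j + c * W j + c * (low + 1) + GmO ds (c * tenp j + low) (j + 1)
  | [], j => by simp [GmO, valO]
  | c' :: ds, j => by
    have hl : (ds ++ [c]).length + j = ds.length + (j + 1) := by simp; omega
    simp only [List.cons_append, GmO, hl, GmO_snoc c low ds j, valO_snoc c low ds j]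
    ring

lemma W_floordiv (j : Nat) :
    45 * ((j : Int) * PySem.Int.floordiv (tenp j) 10) = W j := by
  cases j with
  | zero => decide
  | succ k =>
    rw [tenp_succ, PySem.Int.floordiv_eq_ediv_of_pos (by norm_num : (0:Int) < 10),
        Int.mul_ediv_cancel_left _ (by norm_num : (10:Int) ≠ 0)]
    simp [W]
    ring

lemma loop_eq : ∀ (k : Nat) (m : Int), m.toNat ≤ k → 0 ≤ m →
    ∀ (low : Int) (j : Nat) (total : Int),
      way_1_alt_loop m low (tenp j) (j : Int) total = total + GmO (get_digits m) low j := by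
  intro k
  induction k with
  | zero =>
    intro m hk hm low j total
    have hm0 : m = 0 := by omega
    subst hm0
    rw [way_1_alt_loop, if_neg (by norm_num), get_digits_eq, lsd, if_neg (by norm_num)]
    simp [GmO]
  | succ k ih =>
    intro m hk hm low j total
    by_cases h : 0 < m
    · rw [way_1_alt_loop, if_pos h]
      have hdiv : (PySem.Int.floordiv m 10).toNat ≤ k := by
        rw [PySem.Int.floordiv_eq_ediv_of_pos (by norm_num : (0:Int) < 10)]
        omega
      have hdiv0 : 0 ≤ PySem.Int.floordiv m 10 := by
        rw [PySem.Int.floordiv_eq_ediv_of_pos (by norm_num : (0:Int) < 10)]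
        omega
      have hp : tenp j * 10 = tenp (j + 1) := by rw [tenp_succ]; ring
      have hi : (j : Int) + 1 = ((j + 1 : Nat) : Int) := by push_cast; ring
      rw [hp, hi, ih _ hdiv hdiv0, get_digits_step m h, GmO_snoc]
      have harg : low + PySem.Int.mod m 10 * tenp j = PySem.Int.mod m 10 * tenp j + low := by ring
      rw [harg, ← W_floordiv j]
      simp only [tri]
      ring
    · have hm0 : m = 0 := by omega
      subst hm0
      rw [way_1_alt_loop, if_neg (by norm_num), get_digits_eq, lsd, if_neg (by norm_num)]
      simp [GmO]

lemma top_fold (digits : List Int) (fuel : Nat) (c : Int)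
    (IH : ∀ (S b : Int) (memo : PySem.Dict (Int × Int × Int) Int), GoodMemo digits memo →
      (way_1_rec digits (digits.length : Int) fuel 1 S b memo).1
          = pvRec (digits.drop 1) S b
        ∧ GoodMemo digits (way_1_rec digits (digits.length : Int) fuel 1 S b memo).2) :
    ∀ (ds : List Int) (a : Int) (memo : PySem.Dict (Int × Int × Int) Int),
      GoodMemo digits memo →
      (ds.foldl (fun (st : Int × PySem.Dict (Int × Int × Int) Int) digit =>
          let r := if digit == c
            then way_1_rec digits (digits.length : Int) fuel 1 digit 1 st.2
            else way_1_rec digits (digits.length : Int) fuel 1 digit 0 st.2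
          (st.1 + r.1, r.2)) (a, memo)).1
        = ds.foldl (fun acc d => acc + pvRec (digits.drop 1) d (if d == c then 1 else 0)) a
      ∧ GoodMemo digits
          ((ds.foldl (fun (st : Int × PySem.Dict (Int × Int × Int) Int) digit =>
            let r := if digit == c
              then way_1_rec digits (digits.length : Int) fuel 1 digit 1 st.2
              else way_1_rec digits (digits.length : Int) fuel 1 digit 0 st.2
            (st.1 + r.1, r.2)) (a, memo)).2) := by
  intro ds
  induction ds with
  | nil => intro a memo hg; exact ⟨rfl, hg⟩
  | cons d ds ihds =>
    intro a memo hg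
    simp only [List.foldl]
    cases hb : (d == c) with
    | true =>
      simp only [reduceIte]
      obtain ⟨e1, e2⟩ := IH d 1 memo hg
      obtain ⟨f1, f2⟩ := ihds
        (a + (way_1_rec digits (digits.length : Int) fuel 1 d 1 memo).1)
        (way_1_rec digits (digits.length : Int) fuel 1 d 1 memo).2 e2
      refine ⟨?_, f2⟩
      rw [f1, e1]
    | false =>
      simp only [Bool.false_eq_true, reduceIte]
      obtain ⟨e1, e2⟩ := IH d 0 memo hg
      obtain ⟨f1, f2⟩ := ihds
        (a + (way_1_rec digits (digits.length : Int) fuel 1 d 0 memo).1)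
        (way_1_rec digits (digits.length : Int) fuel 1 d 0 memo).2 e2
      refine ⟨?_, f2⟩
      rw [f1, e1]

lemma way_1_eq_pvRec (n : Int) (h : 1 ≤ n) : way_1 n = pvRec (get_digits n) 0 1 := by
  have hne : get_digits n ≠ [] := by
    rw [get_digits_eq, lsd, if_pos (by omega : (0:Int) < n)]
    simp
  obtain ⟨c, rest, hds⟩ := List.exists_cons_of_ne_nil hne
  have hempty : GoodMemo (c :: rest)
      (PySem.Dict.empty : PySem.Dict (Int × Int × Int) Int) := by
    intro i S b v hv
    rw [PySem.Dict.get?_empty] at hv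
    cases hv
  have hfuel : ((((c :: rest).length : Nat) : Int) - 1).toNat = rest.length := by
    simp
  have IH : ∀ (S b : Int) (memo : PySem.Dict (Int × Int × Int) Int),
      GoodMemo (c :: rest) memo →
      (way_1_rec (c :: rest) (((c :: rest).length : Nat) : Int) rest.length 1 S b memo).1
          = pvRec ((c :: rest).drop 1) S b
        ∧ GoodMemo (c :: rest)
            (way_1_rec (c :: rest) (((c :: rest).length : Nat) : Int) rest.length 1 S b memo).2 := by
    intro S b memo hg
    have := recAux_correct (c :: rest) rest.length 1 S b memo (by omega) (by simp; omega) hg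
    simpa using this
  rw [way_1]
  simp only [hds, PySem.List.pyGet?_zero_cons, Option.getD_some, hfuel]
  obtain ⟨hfold, -⟩ := top_fold (c :: rest) rest.length c IH
    (PySem.List.pyRange 0 (c + 1) 1) 0 PySem.Dict.empty hempty
  rw [hfold, pvRec]
  simp only [show ((1:Int) == 1) = true from rfl, if_true, Bool.true_and, List.drop_succ_cons,
    List.drop_zero]
  have hfun : (fun (a d : Int) => a + pvRec rest (0 + d) (if d == c then 1 else 0))
      = (fun a d => a + pvRec rest d (if d == c then 1 else 0)) := by
    funext a d
    rw [zero_add]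
  rw [hfun]

-- ===== VERDICT (by name: the statement is the Claim_ definition above) =====
theorem way_1_spec : Claim_equal_way_1 := by
  intro n _ hpre
  unfold Spec_way_1
  have h1 : (1:Int) ≤ n := hpre
  rw [way_1_eq_pvRec n h1, pvRec_bound _ 0 (get_digits_nonneg n), way_1_alt]
  have hloop : way_1_alt_loop n 0 1 0 0 = 0 + GmO (get_digits n) 0 0 := by
    have := loop_eq n.toNat n (le_refl _) (by omega) 0 0 0
    simpa [tenp] using this
  rw [hloop]
  ring
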